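-- pv_equiv track=rewrite | github.com/murphy-codes/challenges | Python_edabit_Hard_Words-With-Duplicate-Letters.py | no_duplicate_letters
-- ===== SOURCE A (Python) =====
-- def no_duplicate_letters(phrase):
--   result = True
--   words = phrase.split()
--   i = 0
--   while result and i < len(words):
--     chars = dict()
--     for l in words[i]:
--       # Use to make result case-sensitive, replacing l with j above
--       # l = j.lower()
--       if l in chars:
--         chars[l] = chars[l]+1
--         result = False
--       else:
--         chars[l] = 1
--     i+=1
--   return result
-- ===== SOURCE B (Python) =====
-- def no_duplicate_letters(phrase):
--     def has_adjacent_dup(word):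
--         s = sorted(word)
--         return any(a == b for a, b in zip(s, s[1:]))
--     return all(not has_adjacent_dup(w) for w in phrase.split())
-- ===== Notes on version B (the rewrite author's own statement) =====
-- stated objective: alternative
-- what changed: Replaces the while/dict-counting loop (membership test in a growing dict per character) by sort-each-word and a single adjacent-pair scan, expressed as all()/any() comprehensions.
import Mathlib
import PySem

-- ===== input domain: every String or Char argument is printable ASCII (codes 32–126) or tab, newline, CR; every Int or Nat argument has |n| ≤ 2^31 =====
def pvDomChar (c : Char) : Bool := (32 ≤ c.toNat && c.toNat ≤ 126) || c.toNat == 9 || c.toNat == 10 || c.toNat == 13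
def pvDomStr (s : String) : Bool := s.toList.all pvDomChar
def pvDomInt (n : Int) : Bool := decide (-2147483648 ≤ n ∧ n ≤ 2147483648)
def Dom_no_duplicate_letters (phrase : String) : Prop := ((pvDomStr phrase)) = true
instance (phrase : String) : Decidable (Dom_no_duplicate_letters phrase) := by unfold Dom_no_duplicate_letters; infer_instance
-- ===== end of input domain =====

-- B replaces A's while/dict-counting loop by sorting each word and scanning adjacent pairs (alternative algorithm, similar cost).

-- ===== PORT A =====
-- inner 'for l in words[i]' loop: state = (chars dict, result flag)
def pvAStep (st : PySem.Dict Char Int × Bool) (l : Char) : PySem.Dict Char Int × Bool :=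
  match st.1.get? l with
  | some v => (st.1.insert l (v + 1), false)
  | none   => (st.1.insert l 1, st.2)

-- 'while result and i < len(words)' loop, walking the remaining words
def pvAWhile : List (List Char) → Bool → Bool
  | [], result => result
  | w :: ws, result =>
    if result then pvAWhile ws (w.foldl pvAStep (PySem.Dict.empty, result)).2
    else result

def no_duplicate_letters (phrase : String) : Bool :=
  pvAWhile (PySem.Chars.split₀ phrase.toList) true

-- ===== PORT B =====
-- any(a == b for a, b in zip(s, s[1:]))  (s[1:] ported as List.drop 1, exact)
def pvBHasAdjDup (word : List Char) : Bool :=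
  let s := PySem.List.sorted word (fun x => x) false
  (s.zip (s.drop 1)).any (fun p => p.1 == p.2)

def no_duplicate_letters_alt (phrase : String) : Bool :=
  (PySem.Chars.split₀ phrase.toList).all (fun w => !pvBHasAdjDup w)

-- ===== PRECONDITION & SPEC =====
def Spec_no_duplicate_letters (phrase : String) (out : Bool) : Prop := out = no_duplicate_letters_alt phrase
instance (phrase : String) (out : Bool) : Decidable (Spec_no_duplicate_letters phrase out) := by unfold Spec_no_duplicate_letters; infer_instance

-- ===== CLAIM (what is proved, stated in full; the proofs are below) =====
def Claim_equal_no_duplicate_letters : Prop := ∀ (phrase : String), Dom_no_duplicate_letters phrase → Spec_no_duplicate_letters phrase (no_duplicate_letters phrase)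

-- ===== LEMMAS AND PROOFS =====

-- A's inner fold: result flag = r && (rest has no internal duplicate and no key already in d)
theorem pvAStep_foldl_snd (rest : List Char) (d : PySem.Dict Char Int) (r : Bool) :
    (rest.foldl pvAStep (d, r)).2
      = (r && decide (rest.Nodup ∧ ∀ x ∈ rest, d.get? x = none)) := by
  induction rest generalizing d r with
  | nil => simp
  | cons a t ih =>
    simp only [List.foldl_cons]
    rcases h : d.get? a with _ | v
    · have hstep : pvAStep (d, r) a = (d.insert a 1, r) := by
        simp [pvAStep, h]
      rw [hstep, ih]
      by_cases ha : a ∈ t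
      · have : ¬ (a :: t).Nodup := by simp [List.nodup_cons, ha]
        have h2 : (d.insert a 1).get? a = some 1 := PySem.Dict.get?_insert_self d a 1
        simp only [this, false_and, decide_false, Bool.and_false]
        have : ¬ (t.Nodup ∧ ∀ x ∈ t, (d.insert a 1).get? x = none) := by
          rintro ⟨_, hall⟩
          exact (by simp [h2] : ¬ (d.insert a 1).get? a = none) (hall a ha)
        simp [this]
      · congr 1
        rw [decide_eq_decide]
        constructor
        · rintro ⟨hnd, hall⟩
          refine ⟨List.nodup_cons.mpr ⟨ha, hnd⟩, ?_⟩
          intro x hx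
          rcases List.mem_cons.mp hx with rfl | hx'
          · exact h
          · have := hall x hx'
            rwa [PySem.Dict.get?_insert_of_ne d 1 (by rintro rfl; exact ha hx')] at this
        · rintro ⟨hnd, hall⟩
          refine ⟨(List.nodup_cons.mp hnd).2, ?_⟩
          intro x hx
          rw [PySem.Dict.get?_insert_of_ne d 1 (by rintro rfl; exact ha hx)]
          exact hall x (List.mem_cons_of_mem a hx)
    · have hstep : pvAStep (d, r) a = (d.insert a (v + 1), false) := by
        simp [pvAStep, h]
      rw [hstep, ih]
      simp [h]

-- A's whole word check: the flag coming out of the inner loop is 'w has no duplicate'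
theorem pvAWord (w : List Char) :
    (w.foldl pvAStep (PySem.Dict.empty, true)).2 = decide w.Nodup := by
  rw [pvAStep_foldl_snd]
  simp [PySem.Dict.get?, PySem.Dict.empty]

-- adjacent-equal scan on a ≤-sorted list detects exactly 'not Nodup'
theorem adj_scan_sorted (s : List Char) (hs : s.Pairwise (· ≤ ·)) :
    ((s.zip (s.drop 1)).any (fun p => p.1 == p.2)) = !decide s.Nodup := by
  induction s with
  | nil => simp
  | cons a t ih =>
    cases t with
    | nil => simp
    | cons b u =>
      have hpt : (b :: u).Pairwise (· ≤ ·) := (List.pairwise_cons.mp hs).2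
      have hab : a ≤ b := (List.pairwise_cons.mp hs).1 b List.mem_cons_self
      have hbu : ∀ x ∈ u, b ≤ x := fun x hx => (List.pairwise_cons.mp hpt).1 x hx
      simp only [List.drop_succ_cons, List.drop_zero, List.zip_cons_cons, List.any_cons] at ih ⊢
      rw [ih hpt]
      by_cases hab' : a = b
      · subst hab'
        simp [List.nodup_cons]
      · have hnot : a ∉ b :: u := by
          intro hmem
          rcases List.mem_cons.mp hmem with rfl | hmem
          · exact hab' rfl
          · exact hab' (le_antisymm hab (hbu a hmem))
        have ha_u : a ∉ u := fun h => hnot (List.mem_cons_of_mem b h)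
        simp [hab', ha_u]

-- B's per-word test = 'w has a duplicate'
theorem pvBWord (w : List Char) : pvBHasAdjDup w = !decide w.Nodup := by
  unfold pvBHasAdjDup
  rw [adj_scan_sorted _ (by simpa using PySem.List.sorted_pairwise w (fun x => x) )]
  congr 1
  rw [decide_eq_decide]
  exact (PySem.List.sorted_perm w (fun x => x) false).nodup_iff

-- A's while loop with flag true = all-words check
theorem pvAWhile_eq_all (ws : List (List Char)) :
    pvAWhile ws true = ws.all (fun w => decide w.Nodup) := by
  induction ws with
  | nil => rfl
  | cons w t ih =>
    simp only [pvAWhile, if_true, pvAWord, List.all_cons]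
    by_cases h : w.Nodup
    · simp only [h, decide_true, Bool.true_and]; exact ih
    · have : pvAWhile t false = false := by cases t <;> simp [pvAWhile]
      simp [h, this]

-- ===== VERDICT (by name: the statement is the Claim_ definition above) =====
theorem no_duplicate_letters_spec : Claim_equal_no_duplicate_letters := by
  intro phrase _
  unfold Spec_no_duplicate_letters no_duplicate_letters no_duplicate_letters_alt
  rw [pvAWhile_eq_all]
  congr 1
  funext w
  rw [pvBWord, Bool.not_not]
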